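-- pv_equiv track=rewrite | github.com/yurtkulusalih/I2DL | exercise_03/exercise_code/data/dataloader.py | combine_batch_dicts
-- ===== SOURCE A (Python) =====
-- def combine_batch_dicts(batch):
--     batch_dict = {}
--     for data_dict in batch:
--         for key, value in data_dict.items():
--             if key not in batch_dict:
--                 batch_dict[key] = []
--             batch_dict[key].append(value)
--     return batch_dict
-- ===== SOURCE B (Python) =====
-- def combine_batch_dicts(batch):
--     # Column-by-column: index the union of keys first (first-encountered order),
--     # then collect each key's column in one scan per key.
--     keys = list(dict.fromkeys(k for d in batch for k in d))
--     return {key: [d[key] for d in batch if key in d] for key in keys}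
-- ===== Notes on version B (the rewrite author's own statement) =====
-- stated objective: alternative
-- what changed: Replaces A's single accumulating pass that appends values into a growing dict with a two-phase column build: first compute the ordered unique key list with dict.fromkeys, then construct the result per key by one comprehension scan of the batch.
import Mathlib
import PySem

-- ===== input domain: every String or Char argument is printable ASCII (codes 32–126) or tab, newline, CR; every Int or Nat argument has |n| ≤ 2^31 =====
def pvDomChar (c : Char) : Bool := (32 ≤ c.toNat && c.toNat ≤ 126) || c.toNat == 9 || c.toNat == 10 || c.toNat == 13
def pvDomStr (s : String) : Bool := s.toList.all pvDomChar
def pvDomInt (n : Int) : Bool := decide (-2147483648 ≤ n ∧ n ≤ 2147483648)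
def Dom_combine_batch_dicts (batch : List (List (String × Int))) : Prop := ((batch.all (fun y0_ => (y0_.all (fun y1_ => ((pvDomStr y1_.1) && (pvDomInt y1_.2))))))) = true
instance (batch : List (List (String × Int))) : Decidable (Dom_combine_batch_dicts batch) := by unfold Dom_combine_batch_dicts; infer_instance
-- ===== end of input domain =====

-- ===== PORT A =====
-- B differs from A only in decomposition (same cost class); equal on batches of duplicate-free dicts (Pre_).
def combine_batch_dicts (batch : List (List (String × Int))) : List (String × List Int) :=
  (batch.foldl
    (fun batch_dict data_dict =>
      data_dict.foldl
        (fun batch_dict kv =>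
          let bd1 := if batch_dict.contains kv.1 then batch_dict
                     else batch_dict.insert kv.1 ([] : List Int)   -- if key not in batch_dict: batch_dict[key] = []
          bd1.modify kv.1 [] (fun vs => vs ++ [kv.2]))             -- batch_dict[key].append(value)
        batch_dict)
    PySem.Dict.empty).items

-- ===== PORT B =====
def combine_batch_dicts_alt (batch : List (List (String × Int))) : List (String × List Int) :=
  let keys := PySem.List.dedup (batch.flatMap (fun d => (PySem.Dict.mk d).keys))
  keys.map (fun key => (key, batch.filterMap (fun d => (PySem.Dict.mk d).get? key)))

-- ===== PRECONDITION & SPEC =====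
-- Pre_ admits exactly the inputs that encode Python dicts: each inner association list has duplicate-free keys
-- (a Python dict cannot carry two entries for one key, so no other inputs reach A).
def Pre_combine_batch_dicts (batch : List (List (String × Int))) : Prop :=
  ∀ d ∈ batch, (d.map (fun p => p.1)).Nodup
instance (batch : List (List (String × Int))) : Decidable (Pre_combine_batch_dicts batch) := by
  unfold Pre_combine_batch_dicts; infer_instance
def pvWitness_combine_batch_dicts : (List (List (String × Int))) :=
  [[("a", 1), ("b", 2)], [("a", 3)]]
def Spec_combine_batch_dicts (batch : List (List (String × Int))) (out : List (String × List Int)) : Prop := out = combine_batch_dicts_alt batch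
instance (batch : List (List (String × Int))) (out : List (String × List Int)) : Decidable (Spec_combine_batch_dicts batch out) := by unfold Spec_combine_batch_dicts; infer_instance

-- ===== CLAIM (what is proved, stated in full; the proofs are below) =====
def Claim_equal_combine_batch_dicts : Prop := ∀ (batch : List (List (String × Int))), Dom_combine_batch_dicts batch → Pre_combine_batch_dicts batch → Spec_combine_batch_dicts batch (combine_batch_dicts batch)

-- ===== LEMMAS AND PROOFS =====

-- A's inner-loop body ("setdefault to [], then append") is one Dict.modify.
theorem step_eq (bd : PySem.Dict String (List Int)) (kv : String × Int) :
    (let bd1 := if bd.contains kv.1 then bd else bd.insert kv.1 ([] : List Int)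
     bd1.modify kv.1 [] (fun vs => vs ++ [kv.2]))
    = bd.modify kv.1 [] (fun vs => vs ++ [kv.2]) := by
  by_cases h : bd.contains kv.1 = true
  · simp [h]
  · simp only [h, if_neg, Bool.not_eq_true, PySem.Dict.modify,
      PySem.Dict.getD_insert_self, PySem.Dict.insert_insert_self]
    rw [PySem.Dict.getD_of_not_contains bd ([] : List Int) (by simpa using h)]

-- A's whole computation is the canonical grouping fold over the flattened batch.
theorem combA_eq_flatten (batch : List (List (String × Int))) :
    combine_batch_dicts batch
    = ((batch.flatten).foldl (fun d p => d.modify p.1 [] (fun vs => vs ++ [p.2]))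
        PySem.Dict.empty).items := by
  unfold combine_batch_dicts
  congr 1
  rw [List.foldl_flatten]
  apply PySem.List.foldl_congr_mem
  intro bd dd _
  apply PySem.List.foldl_congr_mem
  intro bd' kv _
  exact step_eq bd' kv

-- One duplicate-free dict: the guarded lookup lists exactly its pairs at key k.
theorem dict_column (k : String) (d : List (String × Int))
    (h : (d.map (fun p => p.1)).Nodup) :
    ((PySem.Dict.mk d).get? k).toList
    = (d.filter (fun p => p.1 == k)).map (fun p => p.2) := by
  induction d with
  | nil => simp [PySem.Dict.get?]
  | cons a t ih =>
    simp only [List.map_cons, List.nodup_cons] at h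
    rw [PySem.Dict.get?_mk_cons]
    by_cases hk : a.1 == k
    · have hk' : a.1 = k := by simpa using hk
      have : t.filter (fun p => p.1 == k) = [] := by
        rw [List.filter_eq_nil_iff]
        intro p hp hpk
        exact h.1 (by rw [hk', ← show p.1 = k from by simpa using hpk]; exact List.mem_map_of_mem hp)
      simp [hk, this]
    · simp only [hk, if_neg, Bool.false_eq_true, not_false_iff]
      rw [ih h.2]
      simp [hk]

-- B's column for k equals the values at k in the flattened batch, in order.
theorem column_eq (batch : List (List (String × Int)))
    (hpre : ∀ d ∈ batch, (d.map (fun p => p.1)).Nodup) (k : String) :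
    batch.filterMap (fun d => (PySem.Dict.mk d).get? k)
    = ((batch.flatten).filter (fun p => p.1 == k)).map (fun p => p.2) := by
  induction batch with
  | nil => simp
  | cons d t ih =>
    have hd := hpre d (List.mem_cons_self ..)
    have ht := ih (fun d' hd' => hpre d' (List.mem_cons_of_mem _ hd'))
    rw [List.flatten_cons, List.filter_append, List.map_append, ← ht, ← dict_column k d hd]
    cases hcase : (PySem.Dict.mk d).get? k <;> simp [hcase]

-- ===== VERDICT (by name: the statement is the Claim_ definition above) =====
theorem combine_batch_dicts_spec : Claim_equal_combine_batch_dicts := by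
  intro batch _ hpre
  unfold Spec_combine_batch_dicts combine_batch_dicts_alt
  rw [combA_eq_flatten]
  rw [PySem.Dict.items_eq_map_keys _
    (PySem.Dict.nodup_keys_foldl_modify_key (batch.flatten) (fun p => p.1) []
      (fun _ p vs => vs ++ [p.2]) PySem.Dict.empty (by simp [PySem.Dict.keys_empty])) []]
  rw [PySem.Dict.keys_foldl_modify_key (batch.flatten) (fun p => p.1) []
      (fun _ p vs => vs ++ [p.2]) PySem.Dict.empty]
  have hkeys : PySem.Set.update (PySem.Dict.empty : PySem.Dict String (List Int)).keys
      ((batch.flatten).map (fun p => p.1))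
      = PySem.List.dedup (batch.flatMap (fun d => (PySem.Dict.mk d).keys)) := by
    simp [PySem.Dict.keys_empty, PySem.Set.update_nil_left, PySem.Dict.keys_mk,
      List.flatMap_def, ← List.map_flatten]
  rw [hkeys]
  apply List.map_congr_left
  intro k _
  rw [PySem.Dict.getD_foldl_modify_append, PySem.Dict.getD_empty, List.nil_append,
    column_eq batch hpre k]
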